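-- pv_equiv track=rewrite | github.com/HilaShoshan/FairDivisionOfChores | code/3agents/general_functions.py | map_to_utilities
-- ===== SOURCE A (Python) =====
-- def map_to_utilities(A, utilities):
--     """
--     map the given partial division, A, to utilities lists
--     @:param A: a list of lists representing what the agent get from each category
--     :return: u1 - a list that contains the utility values on agent 1's eyes of each item in A
--              u2 - similar to agent 2
--              u3 - similar to agent 3
--     """
--     u1 = []
--     u2 = []
--     u3 = []
--     for item in A:
--         category_indx = int(item.split("_")[1].split(",")[0])
--         item_indx = int(item.split("_")[1].split(",")[1])
--         u1.append(utilities[category_indx][item_indx][0])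
--         u2.append(utilities[category_indx][item_indx][1])
--         u3.append(utilities[category_indx][item_indx][2])
--     return u1, u2, u3
-- ===== SOURCE B (Python) =====
-- def map_to_utilities(A, utilities):
--     # Build a label -> utility-row index once (each distinct label is parsed a
--     # single time), then read each agent's column in its own pass over A.
--     rows = {}
--     for item in A:
--         if item not in rows:
--             c, i = item.split("_")[1].split(",")[:2]
--             rows[item] = utilities[int(c)][int(i)]
--     u1 = [rows[item][0] for item in A]
--     u2 = [rows[item][1] for item in A]
--     u3 = [rows[item][2] for item in A]
--     return u1, u2, u3
-- ===== Notes on version B (the rewrite author's own statement) =====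
-- stated objective: alternative
-- what changed: A parses every label and appends to three parallel lists inside one loop; B first builds a dict index from distinct labels to their utility rows (parsing each distinct label only once), then reads each agent's column in its own separate pass over A via dict lookups.
import Mathlib
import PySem

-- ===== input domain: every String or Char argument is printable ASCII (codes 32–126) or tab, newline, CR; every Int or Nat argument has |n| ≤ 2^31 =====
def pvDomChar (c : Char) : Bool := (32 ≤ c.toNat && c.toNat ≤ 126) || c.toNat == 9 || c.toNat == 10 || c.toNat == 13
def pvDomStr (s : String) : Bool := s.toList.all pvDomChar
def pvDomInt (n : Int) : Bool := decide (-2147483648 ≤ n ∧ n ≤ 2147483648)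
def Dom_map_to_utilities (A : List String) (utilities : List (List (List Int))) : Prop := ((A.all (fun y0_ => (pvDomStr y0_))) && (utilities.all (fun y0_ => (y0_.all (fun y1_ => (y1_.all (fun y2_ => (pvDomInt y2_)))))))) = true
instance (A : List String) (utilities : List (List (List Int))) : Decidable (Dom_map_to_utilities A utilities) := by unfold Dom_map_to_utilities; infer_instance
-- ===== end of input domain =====

-- B replaces A's single loop with three per-agent appends by a two-phase shape:
-- a dict index from distinct labels to their utility rows, then one separate
-- column-reading pass per agent; return value only (no argument is mutated).

-- ===== PORT A =====
-- A's loop: three lists built by appending per item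
def map_to_utilities (A : List String) (utilities : List (List (List Int))) : List Int × List Int × List Int :=
  A.foldl (fun acc item =>
    let category_indx := (PySem.Int.ofStr? (PySem.List.pyGetD ((PySem.Str.split? (PySem.List.pyGetD ((PySem.Str.split? item "_").getD []) 1 "") ",").getD []) 0 "")).getD 0
    let item_indx := (PySem.Int.ofStr? (PySem.List.pyGetD ((PySem.Str.split? (PySem.List.pyGetD ((PySem.Str.split? item "_").getD []) 1 "") ",").getD []) 1 "")).getD 0
    let row := PySem.List.pyGetD (PySem.List.pyGetD utilities category_indx []) item_indx []
    (acc.1 ++ [PySem.List.pyGetD row 0 0],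
     acc.2.1 ++ [PySem.List.pyGetD row 1 0],
     acc.2.2 ++ [PySem.List.pyGetD row 2 0]))
    ([], [], [])

-- ===== PORT B =====
-- B's parse of one label: c, i = item.split("_")[1].split(",")[:2]; utilities[int(c)][int(i)]
def pvParseRow (utilities : List (List (List Int))) (item : String) : List Int :=
  let fields := PySem.List.slice ((PySem.Str.split? (PySem.List.pyGetD ((PySem.Str.split? item "_").getD []) 1 "") ",").getD []) none (some 2)
  let c := (PySem.Int.ofStr? (PySem.List.pyGetD fields 0 "")).getD 0
  let i := (PySem.Int.ofStr? (PySem.List.pyGetD fields 1 "")).getD 0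
  PySem.List.pyGetD (PySem.List.pyGetD utilities c []) i []

-- pass 1: the label -> row index; passes 2-4: one column per agent
def map_to_utilities_alt (A : List String) (utilities : List (List (List Int))) : List Int × List Int × List Int :=
  let rows := A.foldl (fun (rows : PySem.Dict String (List Int)) item =>
    if rows.contains item then rows else rows.insert item (pvParseRow utilities item)) PySem.Dict.empty
  (A.map (fun item => PySem.List.pyGetD (rows.getD item []) 0 0),
   A.map (fun item => PySem.List.pyGetD (rows.getD item []) 1 0),
   A.map (fun item => PySem.List.pyGetD (rows.getD item []) 2 0))

-- ===== PRECONDITION & SPEC =====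
-- per-item shape check: label splits as "…_c,i…", both indices parse as ints,
-- utilities[c][i] is in range (Python negative indexing allowed) and that row has length ≥ 3
def pvOkItem (utilities : List (List (List Int))) (item : String) : Bool :=
  let parts := (PySem.Str.split? item "_").getD []
  let fs := (PySem.Str.split? (PySem.List.pyGetD parts 1 "") ",").getD []
  decide (2 ≤ parts.length) && decide (2 ≤ fs.length) &&
  (match PySem.Int.ofStr? (PySem.List.pyGetD fs 0 ""), PySem.Int.ofStr? (PySem.List.pyGetD fs 1 "") with
   | some c, some i =>
     (match PySem.List.pyGet? utilities c with
      | some cat =>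
        (match PySem.List.pyGet? cat i with
         | some row => decide (3 ≤ row.length)
         | none => false)
      | none => false)
   | _, _ => false)

-- Pre_ excludes exactly the inputs on which Python A raises (IndexError/ValueError: a label that
-- does not parse, an index out of range, or a utility row shorter than 3).
def Pre_map_to_utilities (A : List String) (utilities : List (List (List Int))) : Prop :=
  A.all (fun item => pvOkItem utilities item) = true
instance (A : List String) (utilities : List (List (List Int))) : Decidable (Pre_map_to_utilities A utilities) := by unfold Pre_map_to_utilities; infer_instance

def pvWitness_map_to_utilities : List String × List (List (List Int)) :=
  (["item_0,0", "item_0,1"], [[[1, 2, 3], [4, 5, 6]]])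

def Spec_map_to_utilities (A : List String) (utilities : List (List (List Int))) (out : List Int × List Int × List Int) : Prop := out = map_to_utilities_alt A utilities
instance (A : List String) (utilities : List (List (List Int))) (out : List Int × List Int × List Int) : Decidable (Spec_map_to_utilities A utilities out) := by unfold Spec_map_to_utilities; infer_instance

-- ===== CLAIM (what is proved, stated in full; the proofs are below) =====
def Claim_equal_map_to_utilities : Prop := ∀ (A : List String) (utilities : List (List (List Int))), Dom_map_to_utilities A utilities → Pre_map_to_utilities A utilities → Spec_map_to_utilities A utilities (map_to_utilities A utilities)

-- ===== LEMMAS AND PROOFS =====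

-- evaluation of pyGetD at index 1 on a two-headed list literal
theorem pvGetD_one_cons {α : Type} (x y : α) (r : List α) (d : α) :
    PySem.List.pyGetD (x :: y :: r) 1 d = y := by
  simp [PySem.List.pyGetD, PySem.List.pyGet?, PySem.List.pyIdx?]

-- B's slice [:2] is transparent for the first two positions of a list of length ≥ 2
theorem pvSlice2 (fs : List String) (h : 2 ≤ fs.length) :
    PySem.List.slice fs none (some 2) = [PySem.List.pyGetD fs 0 "", PySem.List.pyGetD fs 1 ""] := by
  match fs, h with
  | a :: b :: rest, _ =>
    simp [PySem.List.slice_to, PySem.List.pyGetD_zero_cons, pvGetD_one_cons, List.take_succ_cons]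

-- under the per-item shape check, pvParseRow computes exactly A's per-item row
theorem pvParseRow_eq (utilities : List (List (List Int))) (item : String)
    (h : pvOkItem utilities item = true) :
    pvParseRow utilities item =
      (let category_indx := (PySem.Int.ofStr? (PySem.List.pyGetD ((PySem.Str.split? (PySem.List.pyGetD ((PySem.Str.split? item "_").getD []) 1 "") ",").getD []) 0 "")).getD 0
       let item_indx := (PySem.Int.ofStr? (PySem.List.pyGetD ((PySem.Str.split? (PySem.List.pyGetD ((PySem.Str.split? item "_").getD []) 1 "") ",").getD []) 1 "")).getD 0
       PySem.List.pyGetD (PySem.List.pyGetD utilities category_indx []) item_indx []) := by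
  simp only [pvOkItem, Bool.and_eq_true, decide_eq_true_eq] at h
  obtain ⟨⟨-, hfs⟩, -⟩ := h
  simp only [pvParseRow, pvSlice2 _ hfs, PySem.List.pyGetD_zero_cons, pvGetD_one_cons]

-- A's fold from any accumulator appends the three columns of the parsed rows
theorem pvFoldA (utilities : List (List (List Int))) (A : List String)
    (h : ∀ item ∈ A, pvOkItem utilities item = true) (u1 u2 u3 : List Int) :
    A.foldl (fun acc item =>
      let category_indx := (PySem.Int.ofStr? (PySem.List.pyGetD ((PySem.Str.split? (PySem.List.pyGetD ((PySem.Str.split? item "_").getD []) 1 "") ",").getD []) 0 "")).getD 0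
      let item_indx := (PySem.Int.ofStr? (PySem.List.pyGetD ((PySem.Str.split? (PySem.List.pyGetD ((PySem.Str.split? item "_").getD []) 1 "") ",").getD []) 1 "")).getD 0
      let row := PySem.List.pyGetD (PySem.List.pyGetD utilities category_indx []) item_indx []
      (acc.1 ++ [PySem.List.pyGetD row 0 0],
       acc.2.1 ++ [PySem.List.pyGetD row 1 0],
       acc.2.2 ++ [PySem.List.pyGetD row 2 0])) (u1, u2, u3) =
    (u1 ++ A.map (fun it => PySem.List.pyGetD (pvParseRow utilities it) 0 0),
     u2 ++ A.map (fun it => PySem.List.pyGetD (pvParseRow utilities it) 1 0),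
     u3 ++ A.map (fun it => PySem.List.pyGetD (pvParseRow utilities it) 2 0)) := by
  induction A generalizing u1 u2 u3 with
  | nil => simp
  | cons a A ih =>
    have ha := pvParseRow_eq utilities a (h a (List.mem_cons_self))
    simp only [List.foldl_cons, List.map_cons]
    rw [ih (fun it hit => h it (List.mem_cons_of_mem a hit))]
    simp [ha, List.append_assoc]

-- B's cache step, named for the lemmas below
def pvStep (utilities : List (List (List Int))) (d : PySem.Dict String (List Int)) (it : String) : PySem.Dict String (List Int) :=
  if d.contains it then d else d.insert it (pvParseRow utilities it)

-- a key present in the cache stays present through pass 1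
theorem pvContains_mono (utilities : List (List (List Int))) (A : List String)
    (d : PySem.Dict String (List Int)) (k : String) (hk : d.contains k = true) :
    (A.foldl (pvStep utilities) d).contains k = true := by
  induction A generalizing d with
  | nil => exact hk
  | cons a A ih =>
    simp only [List.foldl_cons]
    refine ih _ ?_
    by_cases hc : d.contains a = true
    · rw [pvStep, if_pos hc]; exact hk
    · rw [pvStep, if_neg hc, PySem.Dict.contains_insert]; simp [hk]

-- pass 1 preserves "every cached key maps to its parsed row"
theorem pvCacheInv (utilities : List (List (List Int))) (A : List String)
    (d : PySem.Dict String (List Int))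
    (hd : ∀ k, d.contains k = true → d.getD k [] = pvParseRow utilities k) :
    ∀ k, (A.foldl (pvStep utilities) d).contains k = true →
      (A.foldl (pvStep utilities) d).getD k [] = pvParseRow utilities k := by
  induction A generalizing d with
  | nil => exact hd
  | cons a A ih =>
    simp only [List.foldl_cons]
    refine ih _ ?_
    by_cases hc : d.contains a = true
    · rw [pvStep, if_pos hc]; exact hd
    · rw [pvStep, if_neg hc]
      intro k hk
      rw [PySem.Dict.contains_insert] at hk
      rcases Bool.or_eq_true_iff.mp hk with hka | hkd
      · have : k = a := by simpa using hka
        subst this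
        rw [PySem.Dict.getD_insert_self]
      · rw [PySem.Dict.getD_insert_of_ne]
        · exact hd k hkd
        · intro he; subst he; simp [hkd] at hc

-- after pass 1, every label of A is cached
theorem pvCacheAll (utilities : List (List (List Int))) (A : List String)
    (d : PySem.Dict String (List Int)) :
    ∀ it ∈ A, (A.foldl (pvStep utilities) d).contains it = true := by
  induction A generalizing d with
  | nil => simp
  | cons a A ih =>
    intro it hit
    simp only [List.foldl_cons]
    rcases List.mem_cons.mp hit with rfl | hit
    · refine pvContains_mono utilities A _ it ?_
      by_cases hc : d.contains it = true
      · rw [pvStep, if_pos hc]; exact hc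
      · rw [pvStep, if_neg hc]; exact PySem.Dict.contains_insert_self _ _ _
    · exact ih _ it hit

-- ===== VERDICT (by name: the statement is the Claim_ definition above) =====
theorem map_to_utilities_spec : Claim_equal_map_to_utilities := by
  intro A utilities _ hpre
  show _ = map_to_utilities_alt A utilities
  have hok := List.all_eq_true.mp hpre
  rw [map_to_utilities, pvFoldA utilities A hok]
  simp only [map_to_utilities_alt]
  have hrow : ∀ it ∈ A,
      (A.foldl (pvStep utilities) PySem.Dict.empty).getD it [] = pvParseRow utilities it :=
    fun it hit => pvCacheInv utilities A PySem.Dict.empty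
      (by simp [PySem.Dict.contains_empty]) it (pvCacheAll utilities A PySem.Dict.empty it hit)
  have hfun : (fun (rows : PySem.Dict String (List Int)) item =>
      if rows.contains item then rows else rows.insert item (pvParseRow utilities item)) = pvStep utilities := rfl
  rw [hfun]
  refine Prod.ext ?_ (Prod.ext ?_ ?_) <;>
    simp only [List.nil_append] <;>
    exact (List.map_congr_left (fun it hit => by rw [hrow it hit])).symm
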